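-- pv_equiv track=rewrite | github.com/GrafSpiel/GROMARK | k4_gromark_comprehensive.py | check_key_periodicity
-- ===== SOURCE A (Python) =====
-- def check_key_periodicity(key, max_period=100):
--     """
--     Check if a key has a periodic pattern and return the period if found.
--
--     Args:
--         key (list): Key sequence to check
--         max_period (int): Maximum period to check
--
--     Returns:
--         int or None: Period length if found, None otherwise
--     """
--     # Start with period lengths that might be interesting
--     for period in [21, 42, 63, 84]:
--         if period >= len(key):
--             continue
--
--         is_periodic = True
--         for i in range(len(key) - period):
--             if key[i] != key[i + period]:
--                 is_periodic = False
--                 break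
--
--         if is_periodic:
--             return period
--
--     # Check other periods
--     for period in range(1, min(max_period, len(key) // 2)):
--         is_periodic = True
--         for i in range(len(key) - period):
--             if key[i] != key[i + period]:
--                 is_periodic = False
--                 break
--
--         if is_periodic:
--             return period
--
--     return None
-- ===== SOURCE B (Python) =====
-- def check_key_periodicity(key, max_period=100):
--     n = len(key)
--     # special priority periods: one slice comparison each
--     for p in (21, 42, 63, 84):
--         if p < n and key[p:] == key[:n - p]:
--             return p
--     # KMP failure function: k ends as the longest proper border of the whole key,
--     # so n - k is the smallest period of the key
--     fail = [0]
--     k = 0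
--     for i in range(1, n):
--         while k and key[i] != key[k]:
--             k = fail[k - 1]
--         if key[i] == key[k]:
--             k += 1
--         fail.append(k)
--     p0 = n - k
--     if p0 < min(max_period, n // 2):
--         return p0
--     return None
-- ===== Notes on version B (the rewrite author's own statement) =====
-- stated objective: alternative
-- what changed: B checks the four special periods with one slice comparison each, then replaces A's whole candidate loop over range(1, min(max_period, n//2)) (each candidate re-scanned element by element) with a single KMP failure-function pass: the longest proper border k of the key gives the smallest period n - k directly, which is returned iff it lies below the range bound.
import Mathlib
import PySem

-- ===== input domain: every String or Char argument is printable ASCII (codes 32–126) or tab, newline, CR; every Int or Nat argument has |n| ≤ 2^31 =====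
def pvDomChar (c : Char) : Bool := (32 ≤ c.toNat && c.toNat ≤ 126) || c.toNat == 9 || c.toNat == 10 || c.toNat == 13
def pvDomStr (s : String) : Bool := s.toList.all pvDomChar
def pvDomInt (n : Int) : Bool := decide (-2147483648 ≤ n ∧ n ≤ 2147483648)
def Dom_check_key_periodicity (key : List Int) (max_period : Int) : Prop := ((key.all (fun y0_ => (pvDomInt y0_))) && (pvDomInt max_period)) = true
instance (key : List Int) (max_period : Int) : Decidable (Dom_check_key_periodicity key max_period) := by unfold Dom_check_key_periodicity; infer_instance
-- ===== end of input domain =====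

-- B replaces A's candidate-by-candidate inner index scans by one slice test per special
-- period plus a single KMP failure-function pass whose final state yields the smallest
-- period directly (objective: alternative algorithm).

-- ===== PORT A =====
-- inner loop 'for i in range(len(key) - period): if key[i] != key[i + period]: break'
-- (indices are always in range when 0 < period, so pyGetD with default 0 is exact there)
def pvPeriodicA (key : List Int) (period : Int) : Bool :=
  (PySem.List.pyRange 0 ((key.length : Int) - period) 1).all
    (fun i => PySem.List.pyGetD key i 0 == PySem.List.pyGetD key (i + period) 0)

def check_key_periodicity (key : List Int) (max_period : Int) : Option Int :=
  -- first loop: special periods, skipping period >= len(key), return on periodic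
  match [21, 42, 63, 84].find?
      (fun period => decide (period < (key.length : Int)) && pvPeriodicA key period) with
  | some p => some p
  | none =>
    -- second loop: range(1, min(max_period, len(key) // 2))
    (PySem.List.pyRange 1 (min max_period (PySem.Int.floordiv (key.length : Int) 2)) 1).find?
      (fun period => pvPeriodicA key period)

-- ===== PORT B =====
-- 'while k and key[i] != key[k]: k = fail[k - 1]'; fuel = k.toNat suffices because every
-- fail entry built below is < its index, so k strictly decreases (the guards only make
-- the same computation total)
def pvKmpWhile (key fail : List Int) (i k : Int) (fuel : Nat) : Int :=
  match fuel with
  | 0 => k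
  | f + 1 =>
    if decide (k ≠ 0) && !(PySem.List.pyGetD key i 0 == PySem.List.pyGetD key k 0) then
      pvKmpWhile key fail i (PySem.List.pyGetD fail (k - 1) 0) f
    else k

def check_key_periodicity_alt (key : List Int) (max_period : Int) : Option Int :=
  let n : Int := key.length
  -- for p in (21, 42, 63, 84): if p < n and key[p:] == key[:n-p]: return p
  match [21, 42, 63, 84].find? (fun p =>
      decide (p < n) &&
        (PySem.List.slice key (some p) none == PySem.List.slice key none (some (n - p)))) with
  | some p => some p
  | none =>
    -- KMP failure function; st = (fail, k)
    let st := (PySem.List.pyRange 1 n 1).foldl (fun (st : List Int × Int) i =>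
      let k1 := pvKmpWhile key st.1 i st.2 st.2.toNat
      let k2 := if PySem.List.pyGetD key i 0 == PySem.List.pyGetD key k1 0 then k1 + 1 else k1
      (st.1 ++ [k2], k2)) ([0], 0)
    let p0 := n - st.2
    if p0 < min max_period (PySem.Int.floordiv n 2) then some p0 else none

-- ===== PRECONDITION & SPEC =====
def Spec_check_key_periodicity (key : List Int) (max_period : Int) (out : Option Int) : Prop := out = check_key_periodicity_alt key max_period
instance (key : List Int) (max_period : Int) (out : Option Int) : Decidable (Spec_check_key_periodicity key max_period out) := by unfold Spec_check_key_periodicity; infer_instance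

-- ===== CLAIM (what is proved, stated in full; the proofs are below) =====
def Claim_equal_check_key_periodicity : Prop := ∀ (key : List Int) (max_period : Int), Dom_check_key_periodicity key max_period → Spec_check_key_periodicity key max_period (check_key_periodicity key max_period)

-- ===== LEMMAS AND PROOFS =====

-- 'b is a (weak) border of the length-i prefix of key': the first b entries match the
-- last b entries of that prefix (read with getD; all reads are in range when i ≤ len)
def pvWb (key : List Int) (i b : Nat) : Bool :=
  decide (b ≤ i) && (List.range b).all (fun j => key.getD j 0 == key.getD (i - b + j) 0)

-- longest proper border of the length-i prefix (the value KMP's fail[i-1] must have)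
def pvMb (key : List Int) (i : Nat) : Nat := Nat.findGreatest (fun b => pvWb key i b = true) (i - 1)

theorem pvWb_iff (key : List Int) (i b : Nat) :
    pvWb key i b = true ↔ b ≤ i ∧ ∀ j, j < b → key.getD j 0 = key.getD (i - b + j) 0 := by
  simp [pvWb, List.all_eq_true]

theorem pvWb_zero (key : List Int) (i : Nat) : pvWb key i 0 = true := by simp [pvWb]

theorem pvMb_lt (key : List Int) (i : Nat) (h : 1 ≤ i) : pvMb key i < i :=
  lt_of_le_of_lt (Nat.findGreatest_le _) (by omega)

theorem pvMb_spec (key : List Int) (i : Nat) : pvWb key i (pvMb key i) = true :=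
  Nat.findGreatest_spec (P := fun b => pvWb key i b = true) (Nat.zero_le _) (pvWb_zero key i)

theorem pvMb_max (key : List Int) (i b : Nat) (hb : pvWb key i b = true) (hlt : b < i) :
    b ≤ pvMb key i :=
  Nat.le_findGreatest (by omega) hb

-- a border of a border is a border
theorem pvWb_trans (key : List Int) (i c b : Nat)
    (h1 : pvWb key i c = true) (h2 : pvWb key c b = true) : pvWb key i b = true := by
  rw [pvWb_iff] at h1 h2 ⊢
  obtain ⟨hc, H1⟩ := h1; obtain ⟨hb, H2⟩ := h2
  refine ⟨by omega, fun j hj => ?_⟩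
  rw [H2 j hj]
  have := H1 (c - b + j) (by omega)
  rw [show i - c + (c - b + j) = i - b + j by omega] at this
  exact this

-- a shorter border is a border of a longer border
theorem pvWb_nest (key : List Int) (i c b : Nat) (hbc : b ≤ c)
    (h1 : pvWb key i b = true) (h2 : pvWb key i c = true) : pvWb key c b = true := by
  rw [pvWb_iff] at h1 h2 ⊢
  obtain ⟨hb, H1⟩ := h1; obtain ⟨hc, H2⟩ := h2
  refine ⟨hbc, fun j hj => ?_⟩
  rw [H1 j hj]
  have := H2 (c - b + j) (by omega)
  rw [show i - c + (c - b + j) = i - b + j by omega] at this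
  exact this.symm

-- extending a border by one character
theorem pvWb_ext (key : List Int) (i b : Nat) (h1 : 1 ≤ b) (h2 : b ≤ i) :
    pvWb key (i + 1) b = true ↔
      (pvWb key i (b - 1) = true ∧ key.getD (b - 1) 0 = key.getD i 0) := by
  rw [pvWb_iff, pvWb_iff]
  constructor
  · rintro ⟨-, H⟩
    refine ⟨⟨by omega, fun j hj => ?_⟩, ?_⟩
    · have := H j (by omega)
      rw [show i + 1 - b + j = i - (b - 1) + j by omega] at this
      exact this
    · have := H (b - 1) (by omega)
      rw [show i + 1 - b + (b - 1) = i by omega] at this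
      exact this
  · rintro ⟨⟨-, H⟩, hkey⟩
    refine ⟨by omega, fun j hj => ?_⟩
    by_cases hj' : j < b - 1
    · have := H j hj'
      rw [show i - (b - 1) + j = i + 1 - b + j by omega] at this
      exact this
    · have hjb : j = b - 1 := by omega
      subst hjb
      rw [show i + 1 - b + (b - 1) = i by omega]
      exact hkey

-- the while loop ends at the longest extendable border (or 0)
theorem pvKmpWhile_post (key fail : List Int) (i : Nat)
    (hfail : ∀ j : Nat, j < fail.length → fail.getD j 0 = ((pvMb key (j + 1) : Nat) : Int))
    (hflen : i ≤ fail.length) (f : Nat) :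
    ∀ m : Nat, m ≤ f → m < i → pvWb key i m = true →
      (∀ b, pvWb key i b = true → b < i → key.getD b 0 = key.getD i 0 → b ≤ m) →
      ∃ m' : Nat, pvKmpWhile key fail (i : Int) (m : Int) f = (m' : Int) ∧ m' < i ∧
        pvWb key i m' = true ∧
        (∀ b, pvWb key i b = true → b < i → key.getD b 0 = key.getD i 0 → b ≤ m') ∧
        (m' = 0 ∨ key.getD i 0 = key.getD m' 0) := by
  induction f with
  | zero =>
    intro m hmf hmi hWb hmax
    have hm0 : m = 0 := by omega
    subst hm0
    exact ⟨0, rfl, hmi, hWb, hmax, Or.inl rfl⟩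
  | succ f ih =>
    intro m hmf hmi hWb hmax
    by_cases hm0 : m = 0
    · subst hm0
      refine ⟨0, ?_, hmi, hWb, hmax, Or.inl rfl⟩
      simp [pvKmpWhile]
    · by_cases hkey : key.getD i 0 = key.getD m 0
      · refine ⟨m, ?_, hmi, hWb, hmax, Or.inr hkey⟩
        have hkey' : key[i]?.getD 0 = key[m]?.getD 0 := by
          simpa [List.getD_eq_getElem?_getD] using hkey
        simp [pvKmpWhile, PySem.List.pyGetD_natCast, hkey']
      · have hstep : pvKmpWhile key fail (i : Int) (m : Int) (f + 1)
            = pvKmpWhile key fail (i : Int) (PySem.List.pyGetD fail ((m : Int) - 1) 0) f := by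
          have hkey' : ¬ key[i]?.getD 0 = key[m]?.getD 0 := by
            simpa [List.getD_eq_getElem?_getD] using hkey
          simp [pvKmpWhile, PySem.List.pyGetD_natCast, hkey', hm0]
        have hidx : ((m : Int) - 1) = ((m - 1 : Nat) : Int) := by omega
        have hread : PySem.List.pyGetD fail ((m : Int) - 1) 0 = ((pvMb key m : Nat) : Int) := by
          rw [hidx, PySem.List.pyGetD_natCast]
          have := hfail (m - 1) (by omega)
          rw [show m - 1 + 1 = m by omega] at this
          exact this
        rw [hstep, hread]
        have hm2lt : pvMb key m < m := pvMb_lt key m (by omega)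
        refine ih (pvMb key m) (by omega) (by omega) ?_ ?_
        · exact pvWb_trans key i m (pvMb key m) hWb (pvMb_spec key m)
        · intro b hb hbi hbk
          have hbm : b ≤ m := hmax b hb hbi hbk
          rcases Nat.lt_or_ge b m with hbm' | hbm'
          · exact pvMb_max key m b (pvWb_nest key i m b (by omega) hb hWb) hbm'
          · exfalso
            have : b = m := by omega
            subst this
            exact hkey hbk.symm
      
-- the conditional increment after the while loop produces the next failure value
theorem pvStep_mb (key : List Int) (i m' : Nat) (hm : m' < i)
    (hWb : pvWb key i m' = true)
    (hmax : ∀ b, pvWb key i b = true → b < i → key.getD b 0 = key.getD i 0 → b ≤ m')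
    (hexit : m' = 0 ∨ key.getD i 0 = key.getD m' 0) :
    (if key.getD i 0 = key.getD m' 0 then m' + 1 else m') = pvMb key (i + 1) := by
  by_cases hkey : key.getD i 0 = key.getD m' 0
  · rw [if_pos hkey]
    apply le_antisymm
    · apply pvMb_max key (i + 1) (m' + 1) _ (by omega)
      rw [pvWb_ext key i (m' + 1) (by omega) (by omega)]
      exact ⟨by simpa using hWb, by simpa using hkey.symm⟩
    · set c := pvMb key (i + 1) with hc
      rcases Nat.eq_zero_or_pos c with h0 | h0
      · omega
      · have hcw : pvWb key (i + 1) c = true := pvMb_spec key (i + 1)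
        have hci : c < i + 1 := pvMb_lt key (i + 1) (by omega)
        rw [pvWb_ext key i c (by omega) (by omega)] at hcw
        have := hmax (c - 1) hcw.1 (by omega) hcw.2
        omega
  · rw [if_neg hkey]
    have hm0 : m' = 0 := by
      rcases hexit with h | h
      · exact h
      · exact absurd h hkey
    subst hm0
    symm
    by_contra hne
    have h0 : 0 < pvMb key (i + 1) := Nat.pos_of_ne_zero fun h => hne h
    have hcw : pvWb key (i + 1) (pvMb key (i + 1)) = true := pvMb_spec key (i + 1)
    have hci : pvMb key (i + 1) < i + 1 := pvMb_lt key (i + 1) (by omega)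
    rw [pvWb_ext key i (pvMb key (i + 1)) (by omega) (by omega)] at hcw
    have := hmax (pvMb key (i + 1) - 1) hcw.1 (by omega) hcw.2
    have hone : pvMb key (i + 1) - 1 = 0 := by omega
    rw [hone] at hcw
    exact hkey hcw.2.symm

-- the KMP fold computes exactly the failure values
theorem pvKmpFold (key : List Int) :
    ∀ i : Nat, 1 ≤ i →
      ∃ fail : List Int,
        (PySem.List.pyRange 1 (i : Int) 1).foldl (fun (st : List Int × Int) i =>
            let k1 := pvKmpWhile key st.1 i st.2 st.2.toNat
            let k2 := if PySem.List.pyGetD key i 0 == PySem.List.pyGetD key k1 0 then k1 + 1 else k1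
            (st.1 ++ [k2], k2)) ([0], 0)
          = (fail, ((pvMb key i : Nat) : Int)) ∧
        fail.length = i ∧
        (∀ j : Nat, j < i → fail.getD j 0 = ((pvMb key (j + 1) : Nat) : Int)) := by
  intro i
  induction i with
  | zero => omega
  | succ i ih =>
    intro _
    rcases Nat.eq_zero_or_pos i with h1 | h1
    · subst h1
      refine ⟨[0], ?_, rfl, ?_⟩
      · have hr : PySem.List.pyRange 1 ((1 : Nat) : Int) 1 = [] := by decide
        rw [hr]
        simp [pvMb]
      · intro j hj
        have : j = 0 := by omega
        subst this
        simp [pvMb]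
    · obtain ⟨fail, hfold, hlen, hvals⟩ := ih h1
      have hcast : ((i + 1 : Nat) : Int) = (i : Int) + 1 := by push_cast; ring
      rw [hcast, PySem.List.pyRange_one_succ_right (by exact_mod_cast h1), List.foldl_append,
        hfold]
      simp only [List.foldl_cons, List.foldl_nil]
      have htoNat : ((pvMb key i : Nat) : Int).toNat = pvMb key i := by omega
      rw [htoNat]
      obtain ⟨m', hwhile, hm'i, hm'wb, hm'max, hm'exit⟩ :=
        pvKmpWhile_post key fail i (fun j hj => hvals j (by omega)) (by omega) (pvMb key i) (pvMb key i) le_rfl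
          (pvMb_lt key i h1) (pvMb_spec key i)
          (fun b hb hbi _ => pvMb_max key i b hb hbi)
      rw [hwhile]
      have hk2 : (if PySem.List.pyGetD key (i : Int) 0 == PySem.List.pyGetD key (m' : Int) 0
            then ((m' : Nat) : Int) + 1 else ((m' : Nat) : Int))
          = ((pvMb key (i + 1) : Nat) : Int) := by
        rw [← pvStep_mb key i m' hm'i hm'wb hm'max hm'exit]
        simp only [PySem.List.pyGetD_natCast, beq_iff_eq]
        split_ifs <;> push_cast <;> ring
      refine ⟨fail ++ [((pvMb key (i + 1) : Nat) : Int)], by rw [hk2], by simp [hlen], ?_⟩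
      intro j hj
      rcases Nat.lt_or_ge j i with hji | hji
      · rw [List.getD_append fail _ 0 j (by omega)]
        exact hvals j hji
      · have : j = i := by omega
        subst this
        rw [← hlen]
        simp

-- A's inner index scan IS the border test, for 1 ≤ q < len(key)
theorem pvPeriodicA_eq_Wb (key : List Int) (q : Nat) (h1 : 1 ≤ q) (h2 : q < key.length) :
    pvPeriodicA key (q : Int) = pvWb key key.length (key.length - q) := by
  rw [Bool.eq_iff_iff, pvWb_iff]
  simp only [pvPeriodicA, List.all_eq_true, PySem.List.mem_pyRange_one, beq_iff_eq]
  constructor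
  · intro H
    refine ⟨by omega, fun j hj => ?_⟩
    have := H (j : Int) ⟨by positivity, by omega⟩
    rw [show ((j : Int) + (q : Int)) = ((j + q : Nat) : Int) by push_cast; ring] at this
    simp only [PySem.List.pyGetD_natCast] at this
    rw [show key.length - (key.length - q) + j = j + q by omega]
    exact this
  · rintro ⟨-, H⟩ x ⟨hx0, hx1⟩
    obtain ⟨j, rfl⟩ : ∃ j : Nat, x = (j : Int) := ⟨x.toNat, by omega⟩
    have := H j (by omega)
    rw [show key.length - (key.length - q) + j = j + q by omega] at this
    rw [show ((j : Int) + (q : Int)) = ((j + q : Nat) : Int) by push_cast; ring]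
    simp only [PySem.List.pyGetD_natCast]
    exact this

-- find? over a range: nothing found
theorem pv_find?_pyRange_none (pred : Int → Bool) (a b : Int)
    (h : ∀ x, a ≤ x → x < b → pred x = false) :
    (PySem.List.pyRange a b 1).find? pred = none := by
  rw [List.find?_eq_none]
  intro x hx
  rw [PySem.List.mem_pyRange_one] at hx
  simp [h x hx.1 hx.2]

-- find? over a range: first hit
theorem pv_find?_pyRange_some_aux (pred : Int → Bool) (b x0 : Int) (hx : pred x0 = true) :
    ∀ fuel : Nat, ∀ a : Int, (b - a).toNat ≤ fuel → a ≤ x0 → x0 < b →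
      (∀ x, a ≤ x → x < x0 → pred x = false) →
      (PySem.List.pyRange a b 1).find? pred = some x0 := by
  intro fuel
  induction fuel with
  | zero => intro a hf ha hb _; omega
  | succ f ih =>
    intro a hf ha hb hmin
    rw [PySem.List.pyRange_one_cons (by omega), List.find?_cons]
    rcases eq_or_lt_of_le ha with he | hlt
    · subst he
      rw [hx]
    · rw [hmin a le_rfl hlt]
      exact ih (a + 1) (by omega) (by omega) hb (fun x h1 h2 => hmin x (by omega) h2)

theorem pv_find?_pyRange_some (pred : Int → Bool) (a b x0 : Int) (ha : a ≤ x0) (hb : x0 < b)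
    (hx : pred x0 = true) (hmin : ∀ x, a ≤ x → x < x0 → pred x = false) :
    (PySem.List.pyRange a b 1).find? pred = some x0 :=
  pv_find?_pyRange_some_aux pred b x0 hx (b - a).toNat a le_rfl ha hb hmin

-- find? only looks at the predicate on members of the list
theorem pv_find?_congr {α : Type} (l : List α) (p q : α → Bool)
    (h : ∀ x ∈ l, p x = q x) : l.find? p = l.find? q := by
  induction l with
  | nil => rfl
  | cons a t ih =>
    simp only [List.find?_cons, h a (by simp)]
    cases q a <;> simp [ih (fun x hx => h x (by simp [hx]))]

-- the inner index scan of A equals the slice comparison of B, for 0 < p < len(key)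
theorem pv_periodic_eq_slice (key : List Int) (p : Int)
    (h0 : 0 < p) (hn : p < (key.length : Int)) :
    pvPeriodicA key p =
      (PySem.List.slice key (some p) none
        == PySem.List.slice key none (some ((key.length : Int) - p))) := by
  rw [PySem.List.slice_from key (le_of_lt h0), PySem.List.slice_to key (by omega)]
  rw [Bool.eq_iff_iff]
  simp only [pvPeriodicA, List.all_eq_true, PySem.List.mem_pyRange_one, beq_iff_eq]
  set a : Nat := p.toNat with ha
  have hpa : p = (a : Int) := by omega
  have haL : a < key.length := by omega
  have hlen : ((key.length : Int) - p).toNat = key.length - a := by omega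
  constructor
  · intro h
    apply List.ext_getElem
    · simp [hlen]
    · intro i h1 h2
      have hi : i < key.length - a := by simpa using h1
      have := h i ⟨by positivity, by omega⟩
      simp only [hpa] at this
      rw [show ((i : Int) + (a : Int)) = ((i + a : Nat) : Int) by push_cast; ring] at this
      simp only [PySem.List.pyGetD_natCast] at this
      rw [List.getD_eq_getElem _ _ (by omega), List.getD_eq_getElem _ _ (by omega)] at this
      simp only [List.getElem_drop, List.getElem_take]
      simpa [Nat.add_comm] using this.symm
  · rintro h i ⟨hi0, hi1⟩
    obtain ⟨j, rfl⟩ : ∃ j : Nat, i = (j : Int) := ⟨i.toNat, by omega⟩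
    have hj : j < key.length - a := by omega
    have := congrArg (fun l => l[j]?) h
    simp only [List.getElem?_drop, List.getElem?_take] at this
    rw [show ((j : Int) + p) = ((j + a : Nat) : Int) by push_cast; omega]
    simp only [PySem.List.pyGetD_natCast]
    rw [List.getD_eq_getElem _ _ (by omega), List.getD_eq_getElem _ _ (by omega)]
    simp only [List.getElem?_eq_getElem (by omega : a + j < key.length),
      List.getElem?_eq_getElem (by omega : j < key.length)] at this
    rw [hlen, if_pos hj] at this
    have := Option.some.inj this
    simpa [Nat.add_comm] using this.symm

-- ===== VERDICT (by name: the statement is the Claim_ definition above) =====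
theorem check_key_periodicity_spec : Claim_equal_check_key_periodicity := by
  intro key max_period _
  unfold Spec_check_key_periodicity check_key_periodicity check_key_periodicity_alt
  simp only []
  have hspecial : List.find? (fun p =>
        decide (p < (key.length : Int)) &&
          (PySem.List.slice key (some p) none
            == PySem.List.slice key none (some ((key.length : Int) - p)))) [21, 42, 63, 84]
      = List.find? (fun period =>
        decide (period < (key.length : Int)) && pvPeriodicA key period) [21, 42, 63, 84] := by
    apply pv_find?_congr
    intro x hx
    have hxpos : (0 : Int) < x := by fin_cases hx <;> norm_num
    by_cases hlt : x < (key.length : Int)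
    · rw [pv_periodic_eq_slice key x hxpos hlt]
    · simp [hlt]
  rw [hspecial]
  have hfd : PySem.Int.floordiv ((key.length : Nat) : Int) 2 = ((key.length / 2 : Nat) : Int) := by
    exact_mod_cast PySem.Int.floordiv_natCast key.length 2
  have hrange : (PySem.List.pyRange 1 (min max_period (PySem.Int.floordiv (key.length : Int) 2)) 1).find?
        (fun period => pvPeriodicA key period)
      = (let st := (PySem.List.pyRange 1 ((key.length : Nat) : Int) 1).foldl
            (fun (st : List Int × Int) i =>
              let k1 := pvKmpWhile key st.1 i st.2 st.2.toNat
              let k2 := if PySem.List.pyGetD key i 0 == PySem.List.pyGetD key k1 0 then k1 + 1 else k1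
              (st.1 ++ [k2], k2)) ([0], 0)
          if (key.length : Int) - st.2 < min max_period (PySem.Int.floordiv (key.length : Int) 2)
          then some ((key.length : Int) - st.2) else none) := by
    rcases Nat.eq_zero_or_pos key.length with hn0 | hn1
    · rw [hn0] at hfd ⊢
      have hlim : min max_period (PySem.Int.floordiv ((0 : Nat) : Int) 2) ≤ 0 := by
        rw [hfd]; exact le_trans (min_le_right _ _) (by norm_num)
      rw [pv_find?_pyRange_none _ _ _ (fun x h1 h2 => by have := lt_of_lt_of_le h2 hlim; omega)]
      have hr0 : PySem.List.pyRange 1 ((0 : Nat) : Int) 1 = [] := by decide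
      rw [hr0]
      simp only [List.foldl_nil]
      rw [if_neg (by push_cast at hlim ⊢; omega)]
    · obtain ⟨fail, hfold, -, -⟩ := pvKmpFold key key.length hn1
      rw [hfold]
      simp only []
      have hp0 : ((key.length : Nat) : Int) - ((pvMb key key.length : Nat) : Int)
          = ((key.length - pvMb key key.length : Nat) : Int) := by
        have := pvMb_lt key key.length hn1
        omega
      set M := pvMb key key.length with hM
      set P0 : Nat := key.length - M with hP0
      have hMlt : M < key.length := pvMb_lt key key.length hn1
      by_cases hlt : ((key.length : Nat) : Int) - ((M : Nat) : Int)
          < min max_period (PySem.Int.floordiv (key.length : Int) 2)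
      · rw [if_pos hlt]
        have hP0n : P0 < key.length := by
          have : ((P0 : Nat) : Int) < ((key.length / 2 : Nat) : Int) := by
            rw [← hfd]
            calc ((P0 : Nat) : Int) = (key.length : Int) - (M : Int) := by omega
            _ < _ := lt_of_lt_of_le hlt (min_le_right _ _)
          have hhalf : key.length / 2 < key.length := by omega
          omega
        rw [hp0]
        apply pv_find?_pyRange_some
        · omega
        · rw [← hp0]; exact hlt
        · rw [pvPeriodicA_eq_Wb key P0 (by omega) hP0n]
          rw [show key.length - P0 = M by omega]
          exact pvMb_spec key key.length
        · intro x h1 h2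
          obtain ⟨q, rfl⟩ : ∃ q : Nat, x = (q : Int) := ⟨x.toNat, by omega⟩
          have hq1 : 1 ≤ q := by omega
          have hqP0 : q < P0 := by omega
          rw [pvPeriodicA_eq_Wb key q hq1 (by omega)]
          by_contra hcon
          have hwb : pvWb key key.length (key.length - q) = true := by
            revert hcon
            cases pvWb key key.length (key.length - q) <;> simp
          have := pvMb_max key key.length (key.length - q) hwb (by omega)
          omega
      · rw [if_neg hlt]
        apply pv_find?_pyRange_none
        intro x h1 h2
        obtain ⟨q, rfl⟩ : ∃ q : Nat, x = (q : Int) := ⟨x.toNat, by omega⟩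
        have hq1 : 1 ≤ q := by omega
        have hqn : q < key.length := by
          have : ((q : Nat) : Int) < ((key.length / 2 : Nat) : Int) := by
            rw [← hfd]
            exact lt_of_lt_of_le h2 (min_le_right _ _)
          have : key.length / 2 < key.length := by omega
          omega
        rw [pvPeriodicA_eq_Wb key q hq1 hqn]
        by_contra hcon
        have hwb : pvWb key key.length (key.length - q) = true := by
          revert hcon
          cases pvWb key key.length (key.length - q) <;> simp
        have := pvMb_max key key.length (key.length - q) hwb (by omega)
        omega
  rw [hrange]
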